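-- pv_equiv track=rewrite | github.com/yeldarbskich/Project-Euler | numtheo.py | div0
-- ===== SOURCE A (Python) =====
-- def div0(p,x):
-- 	"""Input a prime factorization list of pairs [(p,r)] and outputs the divisor function for an integer parameter x. x=0 gives the number of divisors, x=1 gives the sum of the divisors, x=k gives the sum of the k-powers of the divisors."""
-- 	prod=1
-- 	if x > 0:
-- 		for y in p:
-- 			prod = prod*(y[0]**((y[1]+1)*x)-1)//(y[0]**x-1)
-- 	else:
-- 		for y in p:
-- 			prod = prod*(1+y[1])
--
-- 	return prod
-- ===== SOURCE B (Python) =====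
-- def div0(p, x):
--     """Divisor function from a prime factorization. Instead of A's closed-form
--     quotient, each prime's geometric sum 1 + q^x + ... + q^(r*x) is built by a
--     Horner recurrence f -> 1 + q**x * f, with no division at all; the branch on
--     x is taken per factor rather than once around two loops."""
--     prod = 1
--     for q, r in p:
--         if x > 0:
--             f = 0
--             for _ in range(r + 1):
--                 f = 1 + q ** x * f
--         else:
--             f = 1 + r
--         prod *= f
--     return prod
-- ===== Notes on version B (the rewrite author's own statement) =====
-- stated objective: alternative
-- what changed: For each factor the geometric sum 1+q^x+...+q^(r*x) is built by the Horner recurrence f = 1 + q**x * f repeated r+1 times (no division, no closed-form quotient), with the x>0/x<=0 branch taken per factor inside one loop instead of two separate loops.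
-- outside the precondition, e.g. on div0([(2, -3)], 1): A returns -1.0, B returns 0; on div0([(1, 2)], 1): A raises ZeroDivisionError, B returns 3
import Mathlib
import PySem

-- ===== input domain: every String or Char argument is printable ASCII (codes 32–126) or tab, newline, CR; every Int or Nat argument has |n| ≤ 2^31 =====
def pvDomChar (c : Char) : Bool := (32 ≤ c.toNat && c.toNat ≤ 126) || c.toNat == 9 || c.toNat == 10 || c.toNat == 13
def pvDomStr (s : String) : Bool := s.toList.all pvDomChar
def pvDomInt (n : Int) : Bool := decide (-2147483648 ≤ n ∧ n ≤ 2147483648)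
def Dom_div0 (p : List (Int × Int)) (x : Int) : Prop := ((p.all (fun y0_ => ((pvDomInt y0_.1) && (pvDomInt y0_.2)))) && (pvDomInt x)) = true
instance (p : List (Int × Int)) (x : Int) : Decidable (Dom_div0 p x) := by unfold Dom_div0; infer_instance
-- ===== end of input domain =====

-- B builds each prime's geometric sum by a division-free Horner recurrence instead of
-- A's closed-form quotient (objective: alternative, same cost class on these inputs).

-- ===== PORT A =====
def div0 (p : List (Int × Int)) (x : Int) : Int :=
  if x > 0 then
    p.foldl (fun prod y =>
      PySem.Int.floordiv (prod * (y.1 ^ ((y.2 + 1) * x).toNat - 1)) (y.1 ^ x.toNat - 1)) 1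
  else
    p.foldl (fun prod y => prod * (1 + y.2)) 1

-- ===== PORT B =====
-- the Horner loop: n iterations of f ↦ 1 + q^x * f starting from 0
def hornerSum (q x : Int) : Nat → Int
  | 0 => 0
  | n + 1 => 1 + q ^ x.toNat * hornerSum q x n

def div0_alt (p : List (Int × Int)) (x : Int) : Int :=
  p.foldl (fun prod y =>
    prod * (if x > 0 then hornerSum y.1 x (y.2 + 1).toNat else 1 + y.2)) 1

-- ===== PRECONDITION & SPEC =====
-- Pre_ excludes, for x > 0 only, factor lists with a pair (q,r) where r < -1 (A's negative
-- exponent q**((r+1)*x) produces a float, not an int) or where q^x = 1, i.e. q = 1 or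
-- (q = -1 and x even) (A raises ZeroDivisionError).
def Pre_div0 (p : List (Int × Int)) (x : Int) : Prop :=
  x > 0 → ∀ y ∈ p, -1 ≤ y.2 ∧ y.1 ≠ 1 ∧ (y.1 = -1 → x % 2 = 1)
instance (p : List (Int × Int)) (x : Int) : Decidable (Pre_div0 p x) := by
  unfold Pre_div0; infer_instance

def pvWitness_div0 : (List (Int × Int)) × Int := ([(2, 2), (3, 1)], 1)

def Spec_div0 (p : List (Int × Int)) (x : Int) (out : Int) : Prop := out = div0_alt p x
instance (p : List (Int × Int)) (x : Int) (out : Int) : Decidable (Spec_div0 p x out) := by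
  unfold Spec_div0; infer_instance

-- ===== CLAIM (what is proved, stated in full; the proofs are below) =====
def Claim_equal_div0 : Prop :=
  ∀ (p : List (Int × Int)) (x : Int), Dom_div0 p x → Pre_div0 p x → Spec_div0 p x (div0 p x)

-- ===== LEMMAS AND PROOFS =====

-- the Horner recurrence computes the geometric sum with base q^x
lemma hornerSum_eq_geom (q x : Int) (n : Nat) :
    hornerSum q x n = ∑ i ∈ Finset.range n, (q ^ x.toNat) ^ i := by
  induction n with
  | zero => simp [hornerSum]
  | succ n ih => rw [hornerSum, ih, geom_sum_succ]; ring

-- one step of A's x>0 fold equals one step of B's, for any accumulator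
lemma step_eq (q r x : Int) (prod : Int) (hx : 0 < x) (hr : -1 ≤ r)
    (hq : q ^ x.toNat ≠ 1) :
    PySem.Int.floordiv (prod * (q ^ ((r + 1) * x).toNat - 1)) (q ^ x.toNat - 1)
      = prod * hornerSum q x (r + 1).toNat := by
  have hexp : ((r + 1) * x).toNat = x.toNat * (r + 1).toNat := by
    have h1 : (0:Int) ≤ r + 1 := by omega
    have : (r + 1) * x = ((x.toNat * (r + 1).toNat : Nat) : Int) := by
      push_cast [Int.toNat_of_nonneg h1, Int.toNat_of_nonneg (le_of_lt hx)]
      ring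
    rw [this, Int.toNat_natCast]
  rw [hornerSum_eq_geom, hexp, pow_mul]
  set b : Int := q ^ x.toNat with hb
  have hnum : b ^ (r + 1).toNat - 1 = (b - 1) * ∑ i ∈ Finset.range (r + 1).toNat, b ^ i := by
    rw [mul_comm, geom_sum_mul]
  rw [hnum]
  have hb1 : b - 1 ≠ 0 := fun h => hq (by omega)
  have : prod * ((b - 1) * ∑ i ∈ Finset.range (r + 1).toNat, b ^ i)
      = (b - 1) * (prod * ∑ i ∈ Finset.range (r + 1).toNat, b ^ i) := by ring
  rw [this]
  simp only [PySem.Int.floordiv]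
  exact Int.mul_fdiv_cancel_left _ hb1

lemma fold_eq (x : Int) (hx : 0 < x) :
    ∀ (p : List (Int × Int)) (prod : Int),
      (∀ y ∈ p, -1 ≤ y.2 ∧ y.1 ^ x.toNat ≠ 1) →
      p.foldl (fun prod y =>
        PySem.Int.floordiv (prod * (y.1 ^ ((y.2 + 1) * x).toNat - 1)) (y.1 ^ x.toNat - 1)) prod
      = p.foldl (fun prod y =>
        prod * (if x > 0 then hornerSum y.1 x (y.2 + 1).toNat else 1 + y.2)) prod := by
  intro p
  induction p with
  | nil => intro _ _; rfl
  | cons y p ih =>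
    intro prod h
    have hy := h y (List.mem_cons_self ..)
    simp only [List.foldl_cons]
    rw [if_pos hx, step_eq y.1 y.2 x prod hx hy.1 hy.2]
    exact ih _ (fun z hz => h z (List.mem_cons_of_mem _ hz))

-- the closed-form Pre_ condition implies q^x ≠ 1
lemma pow_ne_one (q x : Int) (hx : 0 < x) (h1 : q ≠ 1) (h2 : q = -1 → x % 2 = 1) :
    q ^ x.toNat ≠ 1 := by
  intro h
  have hu : IsUnit q := IsUnit.of_pow_eq_one h (by omega)
  rcases Int.isUnit_iff.mp hu with rfl | rfl
  · exact h1 rfl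
  · have hev : Even x.toNat := by
      rcases Nat.even_or_odd x.toNat with he | ho
      · exact he
      · rw [Odd.neg_one_pow ho] at h; omega
    have := h2 rfl
    rcases hev with ⟨k, hk⟩
    omega

-- ===== VERDICT (by name: the statement is the Claim_ definition above) =====
theorem div0_spec : Claim_equal_div0 := by
  intro p x _ hpre
  unfold Spec_div0 div0 div0_alt
  by_cases hx : x > 0
  · rw [if_pos hx]
    refine fold_eq x hx p 1 (fun y hy => ?_)
    obtain ⟨hr, h1, h2⟩ := hpre hx y hy
    exact ⟨hr, pow_ne_one y.1 x hx h1 h2⟩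
  · simp only [if_neg hx]
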